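-- pv_equiv track=rewrite | github.com/flynn9x/AI_Assignment2 | assignment2.py | euler_candies
-- ===== SOURCE A (Python) =====
-- def euler_candies(n, k):
--     res = [0 for _ in range(k)]
--     index = 0
--     while n > 0:
--         res[index % k] += min(n, index + 1)
--         n -= (index + 1)
--         index += 1
--     return res
-- ===== SOURCE B (Python) =====
-- def euler_candies(n, k):
--     # Closed-form per residue class: binary-search the number m of complete
--     # gifts, fill the (at most min(m, k)) slots that receive a complete gift
--     # with an arithmetic-series sum, then add the remainder to slot m % k.
--     if n <= 0:
--         return [0] * max(k, 0)
--     hi = 1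
--     while hi * (hi + 1) // 2 <= n:
--         hi *= 2
--     lo = 0
--     while lo < hi:
--         mid = (lo + hi + 1) // 2
--         if mid * (mid + 1) // 2 <= n:
--             lo = mid
--         else:
--             hi = mid - 1
--     m = lo
--     res = [0] * k
--     lim = m if m < k else k
--     for i in range(lim):
--         t = (m - i + k - 1) // k
--         res[i] = t * (i + 1) + k * t * (t - 1) // 2
--     rem = n - m * (m + 1) // 2
--     if rem > 0:
--         res[m % k] += rem
--     return res
-- ===== Notes on version B (the rewrite author's own statement) =====
-- stated objective: faster
-- what changed: Replaces the O(sqrt(n)) one-gift-at-a-time simulation loop by a binary search for the number m of complete gifts plus a closed-form arithmetic-series sum for each of the at most min(m,k) slots that receive a complete gift, with the remainder added at slot m % k.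
import Mathlib
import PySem

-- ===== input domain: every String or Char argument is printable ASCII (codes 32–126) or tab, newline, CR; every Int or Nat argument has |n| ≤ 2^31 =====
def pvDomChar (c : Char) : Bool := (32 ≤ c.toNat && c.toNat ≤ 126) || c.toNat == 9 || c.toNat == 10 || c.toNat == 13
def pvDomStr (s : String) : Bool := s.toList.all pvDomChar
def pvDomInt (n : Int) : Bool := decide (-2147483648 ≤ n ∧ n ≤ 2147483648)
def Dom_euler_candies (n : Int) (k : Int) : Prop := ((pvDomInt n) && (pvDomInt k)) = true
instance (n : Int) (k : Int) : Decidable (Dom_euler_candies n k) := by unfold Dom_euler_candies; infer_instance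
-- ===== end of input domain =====

-- B replaces A's one-gift-at-a-time simulation loop by a binary search for the
-- number m of complete gifts plus a closed-form arithmetic-series sum for each of
-- the at most min(m, k) slots that receive a complete gift (objective: faster).

-- ===== PORT A =====
-- shared helper for Python's 'res[j] += v' (j a valid index on all admitted inputs)
def pvBump (res : List Int) (j : Nat) (v : Int) : List Int :=
  res.set j (res.getD j 0 + v)

-- the while-loop of A; index is Python's 'index' (always ≥ 0, kept as Nat);
-- 'index % k.toNat' equals Python's 'index % k' for k ≥ 1 (for k ≤ 0 Python raises, excluded by Pre_)
theorem pvDecA (n : Int) (index : Nat) (h : 0 < n) :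
    (n - ((index : Int) + 1)).toNat < n.toNat :=
  (Int.toNat_lt_toNat h).mpr
    (sub_lt_self n (add_pos_of_nonneg_of_pos (Int.natCast_nonneg index) Int.one_pos))

def eulerLoopA (k : Int) (n : Int) (index : Nat) (res : List Int) : List Int :=
  if 0 < n then
    eulerLoopA k (n - ((index : Int) + 1)) (index + 1)
      (pvBump res (index % k.toNat) (min n ((index : Int) + 1)))
  else res
termination_by n.toNat
decreasing_by exact pvDecA n index (by assumption)

def euler_candies (n : Int) (k : Int) : List Int :=
  eulerLoopA k n 0 (List.replicate k.toNat 0)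

-- ===== PORT B =====
-- doubling loop 'while hi*(hi+1)//2 <= n: hi *= 2' (hi starts at 1; the '1 ≤ hi'
-- conjunct only makes the recursion total, it is true on every reachable call)
theorem pvDecG (n : Int) (hi : Nat)
    (h : 1 ≤ hi ∧ PySem.Int.floordiv ((hi : Int) * ((hi : Int) + 1)) 2 ≤ n) :
    (n + 1 - ((2 * hi : Nat) : Int)).toNat < (n + 1 - (hi : Int)).toNat := by
  obtain ⟨h1, h2⟩ := h
  rw [PySem.Int.floordiv_eq_ediv_of_pos (by decide : (0 : Int) < 2)] at h2
  have hhi : (1 : Int) ≤ (hi : Int) := Int.toNat_le.mp h1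
  have h2hi : (2 : Int) ≤ (hi : Int) + 1 := by exact_mod_cast Nat.succ_le_succ h1
  have hk : (hi : Int) * 2 ≤ (hi : Int) * ((hi : Int) + 1) :=
    mul_le_mul_of_nonneg_left h2hi (Int.natCast_nonneg hi)
  have hle := Int.ediv_le_ediv (by decide : (0 : Int) < 2) hk
  rw [Int.mul_ediv_cancel _ (by decide : (2 : Int) ≠ 0)] at hle
  have hb : 0 < n + 1 - (hi : Int) :=
    sub_pos.mpr (Int.lt_add_one_iff.mpr (le_trans hle h2))
  refine (Int.toNat_lt_toNat hb).mpr (sub_lt_sub_left ?_ (n + 1))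
  have hlt : hi < 2 * hi := by rw [Nat.two_mul]; exact Nat.lt_add_of_pos_left h1
  exact Int.ofNat_lt.mpr hlt

def eulerGrow (n : Int) (hi : Nat) : Nat :=
  if 1 ≤ hi ∧ PySem.Int.floordiv ((hi : Int) * ((hi : Int) + 1)) 2 ≤ n then
    eulerGrow n (2 * hi)
  else hi
termination_by (n + 1 - (hi : Int)).toNat
decreasing_by exact pvDecG n hi (by assumption)

-- bisection 'while lo < hi: mid = (lo+hi+1)//2; …'
theorem pvMidGt (lo hi : Nat) (h : lo < hi) : lo < (lo + hi + 1) / 2 := by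
  have h2 : (lo + 1) * 2 ≤ lo + hi + 1 := by
    rw [Nat.mul_two]
    calc lo + 1 + (lo + 1) ≤ lo + 1 + hi := Nat.add_le_add_left (Nat.succ_le_of_lt h) _
      _ = lo + hi + 1 := Nat.add_right_comm _ _ _
  exact Nat.lt_of_succ_le ((Nat.le_div_iff_mul_le (by decide : 0 < 2)).mpr h2)

theorem pvMidLe (lo hi : Nat) (h : lo < hi) : (lo + hi + 1) / 2 ≤ hi := by
  have h2 : lo + hi + 1 < (hi + 1) * 2 := by
    rw [Nat.mul_two, Nat.add_assoc]
    exact Nat.add_lt_add_right (Nat.lt_succ_of_lt h) (hi + 1)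
  exact Nat.lt_succ_iff.mp ((Nat.div_lt_iff_lt_mul (by decide : 0 < 2)).mpr h2)

theorem pvDecB1 (lo hi : Nat) (h : lo < hi) : hi - (lo + hi + 1) / 2 < hi - lo :=
  Nat.sub_lt_sub_left h (pvMidGt lo hi h)

theorem pvDecB2 (lo hi : Nat) (h : lo < hi) : (lo + hi + 1) / 2 - 1 - lo < hi - lo :=
  Nat.sub_lt_sub_right (Nat.le_pred_of_lt (pvMidGt lo hi h))
    (Nat.lt_of_lt_of_le
      (Nat.sub_lt (Nat.lt_of_le_of_lt (Nat.zero_le lo) (pvMidGt lo hi h)) Nat.one_pos)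
      (pvMidLe lo hi h))

def eulerBisect (n : Int) (lo hi : Nat) : Nat :=
  if lo < hi then
    let mid := (lo + hi + 1) / 2
    if PySem.Int.floordiv ((mid : Int) * ((mid : Int) + 1)) 2 ≤ n then
      eulerBisect n mid hi
    else
      eulerBisect n lo (mid - 1)
  else lo
termination_by hi - lo
decreasing_by
  · exact pvDecB1 lo hi (by assumption)
  · exact pvDecB2 lo hi (by assumption)

def euler_candies_alt (n : Int) (k : Int) : List Int :=
  if n ≤ 0 then List.replicate k.toNat 0
  else
    let m : Int := (eulerBisect n 0 (eulerGrow n 1) : Nat)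
    let lim : Int := if m < k then m else k
    let res : List Int :=
      (List.range lim.toNat).foldl (fun r (iN : Nat) =>
        let i : Int := (iN : Int)
        let t : Int := PySem.Int.floordiv (m - i + k - 1) k
        r.set iN (t * (i + 1) + PySem.Int.floordiv (k * t * (t - 1)) 2))
        (List.replicate k.toNat 0)
    let rem := n - PySem.Int.floordiv (m * (m + 1)) 2
    if 0 < rem then pvBump res (PySem.Int.mod m k).toNat rem else res

-- ===== PRECONDITION & SPEC =====
-- Pre_ excludes exactly the inputs where A raises: n > 0 with k ≤ 0
-- (ZeroDivisionError for k = 0, IndexError for k < 0).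
def Pre_euler_candies (n : Int) (k : Int) : Prop := 0 < k ∨ n ≤ 0
instance (n : Int) (k : Int) : Decidable (Pre_euler_candies n k) := by
  unfold Pre_euler_candies; infer_instance

def pvWitness_euler_candies : Int × Int := (10, 3)

def Spec_euler_candies (n : Int) (k : Int) (out : List Int) : Prop := out = euler_candies_alt n k
instance (n : Int) (k : Int) (out : List Int) : Decidable (Spec_euler_candies n k out) := by
  unfold Spec_euler_candies; infer_instance

-- ===== CLAIM (what is proved, stated in full; the proofs are below) =====
def Claim_equal_euler_candies : Prop :=
  ∀ (n : Int) (k : Int), Dom_euler_candies n k → Pre_euler_candies n k →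
    Spec_euler_candies n k (euler_candies n k)

-- ===== LEMMAS AND PROOFS =====

-- x-th triangular number
def pvT (x : Nat) : Nat := x * (x + 1) / 2

-- candies handed out by c consecutive full gifts starting at gift 'index'
def pvS (index c : Nat) : Nat :=
  match c with
  | 0 => 0
  | c + 1 => (index + 1) + pvS (index + 1) c

-- apply c consecutive full gifts starting at gift 'index'
def pvAddFull (K index c : Nat) (res : List Int) : List Int :=
  match c with
  | 0 => res
  | c + 1 => pvAddFull K (index + 1) c (pvBump res (index % K) ((index : Int) + 1))

-- number of complete gifts slot i receives among the first m gifts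
def pvTcnt (K m i : Nat) : Nat := if i < m then (m - i + K - 1) / K else 0

-- candies slot i holds after the first m complete gifts
def pvValN (K m i : Nat) : Nat :=
  pvTcnt K m i * (i + 1) + K * pvTcnt K m i * (pvTcnt K m i - 1) / 2

theorem pvT_succ (x : Nat) : pvT (x + 1) = pvT x + (x + 1) := by
  have h : (x + 1) * (x + 1 + 1) = x * (x + 1) + 2 * (x + 1) := by ring
  unfold pvT; omega

theorem pvT_mono {a b : Nat} (h : a ≤ b) : pvT a ≤ pvT b := by
  unfold pvT
  exact Nat.div_le_div_right (Nat.mul_le_mul h (by omega))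

theorem pvS_eq (index c : Nat) : pvT index + pvS index c = pvT (index + c) := by
  induction c generalizing index with
  | zero => simp [pvS]
  | succ c ih =>
    have := ih (index + 1)
    simp only [pvS]
    rw [show index + (c + 1) = (index + 1) + c by omega, ← this, pvT_succ]
    omega

theorem pvBump_length (res : List Int) (j : Nat) (v : Int) :
    (pvBump res j v).length = res.length := by
  simp [pvBump]

theorem pvAddFull_length (K index c : Nat) (res : List Int) :
    (pvAddFull K index c res).length = res.length := by
  induction c generalizing index res with
  | zero => rfl
  | succ c ih => simp [pvAddFull, ih, pvBump_length]

theorem pvBump_getD (res : List Int) (j i : Nat) (v : Int) (hj : j < res.length) :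
    (pvBump res j v).getD i 0 = if i = j then res.getD i 0 + v else res.getD i 0 := by
  unfold pvBump
  by_cases h : i = j
  · subst h
    simp [List.getD, hj]
  · simp [List.getD, Ne.symm h, h]

-- A's loop, characterized: starting with exactly (pvS index c) + rem candies where
-- 0 ≤ rem ≤ index + c, it performs c full gifts then, if rem > 0, one partial gift.
theorem eulerLoopA_char (k : Int) (rem : Int) (hrem0 : 0 ≤ rem) :
    ∀ (c index : Nat) (res : List Int), rem ≤ (index : Int) + c →
      eulerLoopA k ((pvS index c : Int) + rem) index res =
        if 0 < rem then
          pvBump (pvAddFull k.toNat index c res) ((index + c) % k.toNat) rem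
        else pvAddFull k.toNat index c res := by
  intro c
  induction c with
  | zero =>
    intro index res hle
    simp only [pvS, pvAddFull, Int.natCast_zero, Int.zero_add] at *
    by_cases hpos : 0 < rem
    · have hmin : min rem ((index : Int) + 1) = rem := by omega
      have hneg : ¬ (0 < rem - ((index : Int) + 1)) := by omega
      rw [eulerLoopA, if_pos hpos, hmin, eulerLoopA, if_neg hneg, if_pos hpos]
      simp
    · have h0 : rem = 0 := by omega
      subst h0
      rw [eulerLoopA]
      simp
  | succ c ih =>
    intro index res hle
    have hS : (pvS index (c + 1) : Int) = ((index : Int) + 1) + (pvS (index + 1) c : Int) := by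
      rw [show pvS index (c + 1) = (index + 1) + pvS (index + 1) c from rfl]
      push_cast; ring
    have hpos : 0 < (pvS index (c + 1) : Int) + rem := by
      have : (0 : Int) ≤ (pvS (index + 1) c : Int) := Int.natCast_nonneg _
      omega
    rw [eulerLoopA]
    simp only [hpos, if_pos]
    have hmin : min ((pvS index (c + 1) : Int) + rem) ((index : Int) + 1) = (index : Int) + 1 := by
      have : (0 : Int) ≤ (pvS (index + 1) c : Int) := Int.natCast_nonneg _
      rw [hS]; omega
    have harg : (pvS index (c + 1) : Int) + rem - ((index : Int) + 1)
        = (pvS (index + 1) c : Int) + rem := by rw [hS]; ring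
    rw [hmin, harg, ih (index + 1) _ (by push_cast; push_cast at hle; omega)]
    have hidx : index + 1 + c = index + (c + 1) := by omega
    simp only [pvAddFull, hidx]

-- the doubling loop returns some h ≥ 1 with n < pvT h
theorem eulerGrow_char (n : Int) :
    ∀ (hi : Nat), 1 ≤ hi → 1 ≤ eulerGrow n hi ∧ n < (pvT (eulerGrow n hi) : Int) := by
  intro hi
  induction hi using eulerGrow.induct n with
  | case1 hi hcond ih =>
    intro _
    rw [eulerGrow, if_pos hcond]
    exact ih (by omega)
  | case2 hi hcond =>
    intro h1
    rw [eulerGrow, if_neg hcond]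
    refine ⟨h1, ?_⟩
    have hfd : PySem.Int.floordiv ((hi : Int) * ((hi : Int) + 1)) 2 = (pvT hi : Int) := by
      have : ((hi : Int) * ((hi : Int) + 1)) = ((hi * (hi + 1) : Nat) : Int) := by push_cast; ring
      rw [this]
      exact_mod_cast PySem.Int.floordiv_natCast (hi * (hi + 1)) 2
    by_contra hc
    exact hcond ⟨h1, by rw [hfd]; omega⟩

theorem pvT_floordiv (x : Nat) :
    PySem.Int.floordiv ((x : Int) * ((x : Int) + 1)) 2 = (pvT x : Int) := by
  have : ((x : Int) * ((x : Int) + 1)) = ((x * (x + 1) : Nat) : Int) := by push_cast; ring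
  rw [this]
  exact_mod_cast PySem.Int.floordiv_natCast (x * (x + 1)) 2

-- bisection keeps the invariant (pvT lo ≤ n < pvT (hi+1)) and returns the maximal m
theorem eulerBisect_char (n : Int) :
    ∀ (lo hi : Nat), lo ≤ hi → (pvT lo : Int) ≤ n → n < (pvT (hi + 1) : Int) →
      (pvT (eulerBisect n lo hi) : Int) ≤ n ∧ n < (pvT (eulerBisect n lo hi + 1) : Int) := by
  intro lo hi
  induction lo, hi using eulerBisect.induct n with
  | case1 lo hi hlt mid hcond ih =>
    intro _ hlo hhi
    rw [eulerBisect, if_pos hlt]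
    simp only [mid] at *
    rw [if_pos hcond]
    rw [pvT_floordiv] at hcond
    exact ih (by omega) (hcond) hhi
  | case2 lo hi hlt mid hcond ih =>
    intro _ hlo hhi
    rw [eulerBisect, if_pos hlt]
    simp only [mid] at *
    rw [if_neg hcond]
    rw [pvT_floordiv] at hcond
    have hmid1 : 1 ≤ (lo + hi + 1) / 2 := by omega
    have : (lo + hi + 1) / 2 - 1 + 1 = (lo + hi + 1) / 2 := by omega
    exact ih (by omega) hlo (by rw [this]; omega)
  | case3 lo hi hge =>
    intro hle hlo hhi
    rw [eulerBisect, if_neg hge]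
    have : lo = hi := by omega
    subst this
    exact ⟨hlo, hhi⟩

-- back-peeling form of pvAddFull
theorem pvAddFull_snoc (K : Nat) :
    ∀ (c index : Nat) (res : List Int),
      pvAddFull K index (c + 1) res =
        pvBump (pvAddFull K index c res) ((index + c) % K) ((index : Int) + c + 1) := by
  intro c
  induction c with
  | zero => intro index res; simp [pvAddFull]
  | succ c ih =>
    intro index res
    show pvAddFull K (index + 1) (c + 1) (pvBump res (index % K) ((index : Int) + 1)) = _
    rw [ih (index + 1)]
    have h1 : index + 1 + c = index + (c + 1) := by omega
    have h2 : (((index + 1 : Nat)) : Int) + c + 1 = (index : Int) + ((c + 1 : Nat) : Int) + 1 := by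
      push_cast; ring
    rw [h1, h2]
    rfl

-- count recurrence: gift m (amount m+1) goes to slot m % K
theorem pvTcnt_succ (K m i : Nat) (hiK : i < K) :
    pvTcnt K (m + 1) i = pvTcnt K m i + (if m % K = i then 1 else 0) := by
  have hK : 1 ≤ K := by omega
  unfold pvTcnt
  rcases Nat.lt_trichotomy m i with hmi | hmi | hmi
  · -- m < i : no gift yet, and m % K = m ≠ i
    have h1 : ¬ i < m + 1 := by omega
    have h2 : ¬ i < m := by omega
    have h3 : m % K = m := Nat.mod_eq_of_lt (by omega)
    simp [h1, h2, h3, Nat.ne_of_lt hmi]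
  · -- m = i : first gift for slot i
    subst hmi
    have h1 : m < m + 1 := by omega
    have h2 : ¬ m < m := by omega
    have h3 : m % K = m := Nat.mod_eq_of_lt hiK
    have h4 : m + 1 - m + K - 1 = K := by omega
    simp [h1, h3, Nat.div_self (by omega : 0 < K)]
  · -- i < m
    have h1 : i < m + 1 := by omega
    have h2 : i < m := hmi
    have hnum : m + 1 - i + K - 1 = (m - i + K - 1) + 1 := by omega
    rw [if_pos h1, if_pos h2, hnum, Nat.succ_div]
    have hrw : m - i + K - 1 + 1 = (m - i) + K := by omega
    rw [hrw]
    have hdvd : K ∣ m - i + K ↔ K ∣ m - i := Nat.dvd_add_self_right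
    have hmod : m % K = i ↔ K ∣ m - i := by
      constructor
      · intro h
        have : i % K = m % K := by rw [h, Nat.mod_eq_of_lt hiK]
        exact (Nat.modEq_iff_dvd' (by omega)).mp this
      · intro h
        have : i % K = m % K := (Nat.modEq_iff_dvd' (by omega)).mpr h
        rw [Nat.mod_eq_of_lt hiK] at this
        omega
    by_cases h : m % K = i
    · rw [if_pos (hdvd.mpr (hmod.mp h)), if_pos h]
    · rw [if_neg (fun hc => h (hmod.mpr (hdvd.mp hc))), if_neg h]

-- when slot i receives gift m, the count so far is t with m = i + K * t
theorem pvTcnt_hit (K m i : Nat) (hiK : i < K) (hmod : m % K = i) :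
    m = i + K * pvTcnt K m i := by
  rcases Nat.lt_trichotomy m i with hmi | hmi | hmi
  · have : m % K = m := Nat.mod_eq_of_lt (by omega)
    omega
  · subst hmi; simp [pvTcnt]
  · have h2 : i < m := hmi
    obtain ⟨q, hq⟩ : K ∣ m - i := by
      have : i % K = m % K := by rw [hmod, Nat.mod_eq_of_lt hiK]
      exact (Nat.modEq_iff_dvd' (by omega)).mp this
    have hK : 0 < K := by omega
    have : pvTcnt K m i = q := by
      unfold pvTcnt
      rw [if_pos h2]
      have : m - i + K - 1 = K * q + (K - 1) := by omega
      rw [this, Nat.mul_add_div hK]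
      have : (K - 1) / K = 0 := Nat.div_eq_of_lt (by omega)
      omega
    rw [this]; omega

-- exact division step for the triangular part of the value
theorem pvVal_tri_succ (K t : Nat) :
    K * (t + 1) * t / 2 = K * t * (t - 1) / 2 + K * t := by
  rcases t with _ | s
  · simp
  · obtain ⟨e, he⟩ : 2 ∣ (s + 1) * s := by
      rcases Nat.even_or_odd s with h | h
      · exact Dvd.dvd.mul_left h.two_dvd _
      · exact Dvd.dvd.mul_right (Odd.add_one h).two_dvd _
    have h1 : K * (s + 1 + 1) * (s + 1) = 2 * (K * (e + (s + 1))) := by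
      have : (s + 1 + 1) * (s + 1) = (s + 1) * s + 2 * (s + 1) := by ring
      calc K * (s + 1 + 1) * (s + 1) = K * ((s + 1 + 1) * (s + 1)) := by ring
        _ = K * ((s + 1) * s + 2 * (s + 1)) := by rw [this]
        _ = K * (2 * e + 2 * (s + 1)) := by rw [he]
        _ = 2 * (K * (e + (s + 1))) := by ring
    have h2 : K * (s + 1) * s = 2 * (K * e) := by
      calc K * (s + 1) * s = K * ((s + 1) * s) := by ring
        _ = K * (2 * e) := by rw [he]
        _ = 2 * (K * e) := by ring
    have hs : s + 1 - 1 = s := by omega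
    rw [hs, h1, h2, Nat.mul_div_cancel_left _ (by norm_num : 0 < 2),
        Nat.mul_div_cancel_left _ (by norm_num : 0 < 2)]
    ring

-- value recurrence
theorem pvValN_succ (K m i : Nat) (hiK : i < K) :
    (pvValN K (m + 1) i : Int) = (pvValN K m i : Int) + (if i = m % K then (m : Int) + 1 else 0) := by
  by_cases h : m % K = i
  · have ht : pvTcnt K (m + 1) i = pvTcnt K m i + 1 := by
      rw [pvTcnt_succ K m i hiK, if_pos h]
    have hm : m = i + K * pvTcnt K m i := pvTcnt_hit K m i hiK h
    set t := pvTcnt K m i with hts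
    have hval : pvValN K (m + 1) i = pvValN K m i + (m + 1) := by
      unfold pvValN
      rw [ht, ← hts]
      have htri := pvVal_tri_succ K t
      have : (t + 1) * (i + 1) = t * (i + 1) + (i + 1) := by ring
      have hsub : t + 1 - 1 = t := by omega
      rw [hsub]
      omega
    rw [hval, if_pos h.symm]
    push_cast
    ring
  · have ht : pvTcnt K (m + 1) i = pvTcnt K m i := by
      rw [pvTcnt_succ K m i hiK, if_neg h]
      omega
    have : pvValN K (m + 1) i = pvValN K m i := by unfold pvValN; rw [ht]
    rw [this, if_neg (fun hc => h hc.symm)]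
    ring

-- elementwise characterization of pvAddFull on the zero vector
theorem pvAddFull_getD (K : Nat) (hK : 0 < K) :
    ∀ (m i : Nat), i < K →
      (pvAddFull K 0 m (List.replicate K (0 : Int))).getD i 0 = (pvValN K m i : Int) := by
  intro m
  induction m with
  | zero =>
    intro i hi
    simp [pvAddFull, pvValN, pvTcnt, List.getD]
  | succ m ih =>
    intro i hi
    rw [pvAddFull_snoc]
    have hlen : (pvAddFull K 0 m (List.replicate K (0 : Int))).length = K := by
      rw [pvAddFull_length, List.length_replicate]
    rw [pvBump_getD _ _ _ _ (by rw [hlen]; exact Nat.mod_lt _ hK)]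
    simp only [Nat.zero_add, Int.natCast_zero, Int.zero_add]
    rw [pvValN_succ K m i hi]
    by_cases h : i = m % K
    · rw [if_pos h, if_pos h, ih i hi]
    · rw [if_neg h, if_neg h, ih i hi]; ring

-- B's closed-form list equals pvAddFull applied to the zero vector
theorem pvMap_eq_addFull (K : Nat) (hK : 0 < K) (m : Nat) :
    (List.range K).map (fun iN => (pvValN K m iN : Int)) =
      pvAddFull K 0 m (List.replicate K (0 : Int)) := by
  apply List.ext_getElem
  · rw [List.length_map, List.length_range, pvAddFull_length, List.length_replicate]
  · intro i h1 h2
    have hiK : i < K := by simpa using h1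
    have := pvAddFull_getD K hK m i hiK
    rw [List.getD_eq_getElem?_getD, List.getElem?_eq_getElem h2] at this
    simp only [List.getElem_map, List.getElem_range]
    simpa using this.symm

-- the Int-level entry computed by B's port equals pvValN (on the filled prefix i < m)
theorem pvEntry_pos (k : Int) (hk : 0 < k) (mN iN : Nat) (hlt : iN < mN) :
    (let i : Int := (iN : Int)
     let t : Int := PySem.Int.floordiv ((mN : Int) - i + k - 1) k
     t * (i + 1) + PySem.Int.floordiv (k * t * (t - 1)) 2) = (pvValN k.toNat mN iN : Int) := by
  have hkN : k = (k.toNat : Int) := by omega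
  have hnum : (mN : Int) - iN + k - 1 = ((mN - iN + k.toNat - 1 : Nat) : Int) := by
    rw [hkN]; push_cast; omega
  have ht : PySem.Int.floordiv ((mN : Int) - iN + k - 1) k
      = ((mN - iN + k.toNat - 1) / k.toNat : Nat) := by
    rw [hnum, hkN]
    exact_mod_cast PySem.Int.floordiv_natCast (mN - iN + k.toNat - 1) k.toNat
  simp only [ht]
  set tN : Nat := (mN - iN + k.toNat - 1) / k.toNat with htN
  have htc : pvTcnt k.toNat mN iN = tN := by unfold pvTcnt; rw [if_pos hlt]
  rcases Nat.eq_zero_or_pos tN with h0 | hpos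
  · have hv0 : pvValN k.toNat mN iN = 0 := by unfold pvValN; rw [htc, h0]; simp
    rw [hv0, h0]
    have hz : k * ((0 : Nat) : Int) * (((0 : Nat) : Int) - 1) = 0 := by push_cast; ring
    rw [hz, PySem.Int.floordiv_eq_ediv_of_pos (by norm_num : (0 : Int) < 2)]
    norm_num
  · have h1t : ((tN - 1 : Nat) : Int) = (tN : Int) - 1 := by omega
    have harg : k * (tN : Int) * ((tN : Int) - 1) = ((k.toNat * tN * (tN - 1) : Nat) : Int) := by
      push_cast [h1t]
      rw [← hkN]
    have hfd : PySem.Int.floordiv (k * (tN : Int) * ((tN : Int) - 1)) 2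
        = ((k.toNat * tN * (tN - 1) / 2 : Nat) : Int) := by
      rw [harg]
      exact_mod_cast PySem.Int.floordiv_natCast (k.toNat * tN * (tN - 1)) 2
    rw [hfd]
    unfold pvValN
    rw [htc]
    push_cast
    ring

-- slots beyond the filled prefix hold 0
theorem pvValN_zero (K mN iN : Nat) (h : ¬ iN < mN) : pvValN K mN iN = 0 := by
  unfold pvValN pvTcnt
  rw [if_neg h]
  simp

-- B's prefix-filling loop, characterized as a map over all K slots
theorem pvSetLoop (f : Nat → Int) (K : Nat) :
    ∀ (lim : Nat), lim ≤ K →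
      (List.range lim).foldl (fun r j => r.set j (f j)) (List.replicate K (0 : Int)) =
        (List.range K).map (fun i => if i < lim then f i else 0) := by
  intro lim
  induction lim with
  | zero =>
    intro _
    apply List.ext_getElem
    · simp
    · intro i h1 h2
      simp
  | succ lim ih =>
    intro hle
    rw [List.range_succ, List.foldl_append, ih (by omega)]
    apply List.ext_getElem
    · simp
    · intro i h1 h2
      simp only [List.foldl_cons, List.foldl_nil]
      rw [List.getElem_set]
      have hiK : i < K := by simpa using h2
      by_cases hil : lim = i
      · subst hil
        simp [List.getElem_map, List.getElem_range]
      · simp only [hil, if_false, List.getElem_map, List.getElem_range]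
        by_cases h3 : i < lim
        · rw [if_pos h3, if_pos (by omega)]
        · rw [if_neg h3, if_neg (by omega)]
-- ===== VERDICT (by name: the statement is the Claim_ definition above) =====
theorem euler_candies_spec : Claim_equal_euler_candies := by
  intro n k _ hpre
  unfold Spec_euler_candies euler_candies euler_candies_alt
  by_cases hn : n ≤ 0
  · rw [eulerLoopA]
    simp [hn, show ¬ (0 < n) by omega]
  · have hk : 0 < k := by rcases hpre with h | h; exact h; omega
    have hn' : 0 < n := by omega
    have hK : 0 < k.toNat := by omega
    -- the maximal complete-gift count m
    obtain ⟨hh1, hh2⟩ := eulerGrow_char n 1 (by norm_num)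
    set hN := eulerGrow n 1 with hhN
    have hhi : n < (pvT (hN + 1) : Int) := by
      have := pvT_mono (show hN ≤ hN + 1 by omega)
      omega
    obtain ⟨hm1, hm2⟩ := eulerBisect_char n 0 hN (by omega) (by simp [pvT]; omega) hhi
    set mN := eulerBisect n 0 hN with hmN
    set rem : Int := n - (pvT mN : Int) with hrem
    have hrem0 : 0 ≤ rem := by omega
    have hremle : rem ≤ (mN : Int) := by
      have := pvT_succ mN
      omega
    -- A's side
    have hS : (pvS 0 mN : Int) = (pvT mN : Int) := by
      have h := pvS_eq 0 mN
      rw [show pvT 0 = 0 from rfl] at h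
      simp only [Nat.zero_add] at h
      exact_mod_cast h
    have hnsplit : n = (pvS 0 mN : Int) + rem := by rw [hS, hrem]; ring
    have hA := eulerLoopA_char k rem hrem0 mN 0 (List.replicate k.toNat 0) (by push_cast; omega)
    rw [← hnsplit] at hA
    rw [hA, if_neg (show ¬ n ≤ 0 by omega)]
    -- B's side
    have hlimN : (if ((mN : Nat) : Int) < k then ((mN : Nat) : Int) else k).toNat
        = min mN k.toNat := by split_ifs with h <;> omega
    have hmap : (List.range (if ((mN : Nat) : Int) < k then ((mN : Nat) : Int) else k).toNat).foldl
        (fun r (iN : Nat) =>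
          let i : Int := (iN : Int)
          let t : Int := PySem.Int.floordiv (((mN : Nat) : Int) - i + k - 1) k
          r.set iN (t * (i + 1) + PySem.Int.floordiv (k * t * (t - 1)) 2))
        (List.replicate k.toNat 0)
        = pvAddFull k.toNat 0 mN (List.replicate k.toNat 0) := by
      refine Eq.trans (pvSetLoop (fun (iN : Nat) =>
        let i : Int := (iN : Int)
        let t : Int := PySem.Int.floordiv (((mN : Nat) : Int) - i + k - 1) k
        t * (i + 1) + PySem.Int.floordiv (k * t * (t - 1)) 2) k.toNat _ (by omega)) ?_
      rw [← pvMap_eq_addFull k.toNat hK mN]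
      apply List.map_congr_left
      intro iN hiN
      rw [List.mem_range] at hiN
      by_cases hil : iN < (if ((mN : Nat) : Int) < k then ((mN : Nat) : Int) else k).toNat
      · rw [if_pos hil]
        exact pvEntry_pos k hk mN iN (by omega)
      · rw [if_neg hil]
        rw [pvValN_zero k.toNat mN iN (by omega)]
        simp
    have hremB : n - PySem.Int.floordiv ((mN : Int) * ((mN : Int) + 1)) 2 = rem := by
      rw [pvT_floordiv, hrem]
    have hmodB : (PySem.Int.mod (mN : Int) k).toNat = mN % k.toNat := by
      have hkc : (k.toNat : Int) = k := by omega
      rw [← hkc, PySem.Int.mod_natCast mN k.toNat]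
      exact Int.toNat_natCast _
    simp only [hremB, hmap, hmodB]
    by_cases hr : 0 < rem
    · simp [hr]
    · simp [hr]
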